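-- pv_equiv track=rewrite | github.com/k1lv1n/tinkoff_ml | src/utils.py | check_repetition
-- ===== SOURCE A (Python) =====
-- def check_repetition(array):
--     d = dict()
--     for a in array:
--         try:
--             d[a] += 1
--         except KeyError:
--             d[a] = 1
--     res = True
--     for element in d.items():
--         if element[0] != 0 and element[1] > 1:
--             res = False
--     return res
-- ===== SOURCE B (Python) =====
-- def check_repetition(array):
--     seen = set()
--     for a in array:
--         if a == 0:
--             continue
--         if a in seen:
--             return False
--         seen.add(a)
--     return True
-- ===== Notes on version B (the rewrite author's own statement) =====
-- stated objective: simpler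
-- what changed: Replaces the count-everything dict plus a separate full scan of its items with a single pass that keeps a set of already-seen non-zero values and returns False immediately on the first repeat.
import Mathlib
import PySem

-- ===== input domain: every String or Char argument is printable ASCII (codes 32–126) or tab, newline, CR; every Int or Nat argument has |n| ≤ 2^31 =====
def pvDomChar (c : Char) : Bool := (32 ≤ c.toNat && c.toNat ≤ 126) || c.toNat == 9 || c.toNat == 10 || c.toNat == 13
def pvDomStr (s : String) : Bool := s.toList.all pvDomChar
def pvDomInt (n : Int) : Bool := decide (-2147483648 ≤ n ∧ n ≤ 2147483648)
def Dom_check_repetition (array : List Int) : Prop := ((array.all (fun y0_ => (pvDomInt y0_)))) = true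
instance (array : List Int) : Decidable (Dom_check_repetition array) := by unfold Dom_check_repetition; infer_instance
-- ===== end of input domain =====

-- B replaces A's count-everything dict plus a separate items scan by one pass over the
-- array keeping a set of already-seen non-zero values, with an early False on the first repeat (simpler).


-- ===== PORT A =====
-- d = dict(); for a in array: try d[a] += 1 except KeyError: d[a] = 1
-- res = True; for element in d.items(): if element[0] != 0 and element[1] > 1: res = False
def check_repetition (array : List Int) : Bool :=
  let d : PySem.Dict Int Int := array.foldl (fun d a =>
    match PySem.Dict.get? d a with
    | some v => PySem.Dict.insert d a (v + 1)   -- d[a] += 1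
    | none => PySem.Dict.insert d a 1) PySem.Dict.empty  -- except KeyError: d[a] = 1
  (PySem.Dict.items d).foldl (fun res element =>
    if element.1 ≠ 0 ∧ element.2 > 1 then false else res) true

-- ===== PORT B =====
-- the 'for a in array' loop of Source B with early return, carrying the set 'seen'
def crGo (seen : PySem.Set Int) : List Int → Bool
  | [] => true
  | a :: rest =>
    if a = 0 then crGo seen rest
    else if PySem.Set.contains seen a then false
    else crGo (PySem.Set.add seen a) rest

def check_repetition_alt (array : List Int) : Bool :=
  crGo PySem.Set.empty array

-- ===== PRECONDITION & SPEC =====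
def Spec_check_repetition (array : List Int) (out : Bool) : Prop := out = check_repetition_alt array
instance (array : List Int) (out : Bool) : Decidable (Spec_check_repetition array out) := by unfold Spec_check_repetition; infer_instance

-- ===== CLAIM (what is proved, stated in full; the proofs are below) =====
def Claim_equal_check_repetition : Prop := ∀ (array : List Int), Dom_check_repetition array → Spec_check_repetition array (check_repetition array)

-- ===== LEMMAS AND PROOFS =====

-- A's try/except update is the insert-of-getD counting step
theorem crStepA_eq (d : PySem.Dict Int Int) (a : Int) :
    (match PySem.Dict.get? d a with
      | some v => PySem.Dict.insert d a (v + 1)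
      | none => PySem.Dict.insert d a 1) = PySem.Dict.insert d a (PySem.Dict.getD d a 0 + 1) := by
  cases h : PySem.Dict.get? d a with
  | some v => simp [PySem.Dict.getD_eq_get?_getD, h]
  | none => simp [PySem.Dict.getD_eq_get?_getD, h]

-- A's second loop: the flag fold is an 'all'
theorem crFlag_fold (l : List (Int × Int)) (b : Bool) :
    l.foldl (fun res element => if element.1 ≠ 0 ∧ element.2 > 1 then false else res) b
      = (b && l.all (fun e => !(decide (e.1 ≠ 0 ∧ e.2 > 1)))) := by
  induction l generalizing b with
  | nil => simp
  | cons e rest ih =>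
    simp only [List.foldl_cons, List.all_cons, ih]
    by_cases h : e.1 ≠ 0 ∧ e.2 > 1 <;> simp [h]

-- characterisation of A
theorem crA_char (array : List Int) :
    check_repetition array = true ↔ ∀ k ∈ array, k ≠ 0 → array.count k ≤ 1 := by
  unfold check_repetition
  have hfun : (fun (d : PySem.Dict Int Int) (a : Int) =>
      match PySem.Dict.get? d a with
      | some v => PySem.Dict.insert d a (v + 1)
      | none => PySem.Dict.insert d a 1)
      = fun d a => PySem.Dict.insert d a (PySem.Dict.getD d a 0 + 1) :=
    funext fun d => funext fun a => crStepA_eq d a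
  rw [hfun, PySem.Dict.foldl_insert_getD_add_one_eq_counter]
  show (PySem.Dict.items (PySem.Dict.counter array)).foldl
      (fun res element => if element.1 ≠ 0 ∧ element.2 > 1 then false else res) true = true ↔ _
  rw [PySem.Dict.items_counter, crFlag_fold]
  simp only [Bool.true_and, List.all_map, List.all_eq_true, Function.comp]
  constructor
  · intro h k hk hk0
    have := h k ((PySem.Set.mem_ofList _ _).mpr hk)
    simp only [Bool.not_eq_eq_eq_not, Bool.not_true, decide_eq_false_iff_not, not_and, not_lt] at this
    exact_mod_cast this hk0
  · intro h k hk
    have hk' := (PySem.Set.mem_ofList _ _).mp hk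
    simp only [Bool.not_eq_eq_eq_not, Bool.not_true, decide_eq_false_iff_not, not_and, not_lt]
    intro hk0
    exact_mod_cast h k hk' hk0

-- characterisation of B's loop
theorem crGo_char (l : List Int) (seen : PySem.Set Int) :
    crGo seen l = true ↔
      (l.filter (fun x => decide (x ≠ 0))).Nodup ∧ ∀ x ∈ l, x ≠ 0 → x ∉ seen := by
  induction l generalizing seen with
  | nil => simp [crGo]
  | cons a rest ih =>
    by_cases ha : a = 0
    · subst ha
      rw [show crGo seen (0 :: rest) = crGo seen rest from by simp [crGo], ih]
      constructor
      · rintro ⟨h1, h2⟩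
        refine ⟨by simpa using h1, ?_⟩
        intro x hx hx0
        rcases List.mem_cons.mp hx with h | h
        · exact absurd h hx0
        · exact h2 x h hx0
      · rintro ⟨h1, h2⟩
        exact ⟨by simpa using h1, fun x hx hx0 => h2 x (List.mem_cons_of_mem _ hx) hx0⟩
    · have hc : PySem.Set.contains seen a = decide (a ∈ seen) := by
        simp [PySem.Set.contains]
      by_cases hm : a ∈ seen
      · simp only [crGo, if_neg ha, hc, hm, decide_true, if_true]
        constructor
        · intro h; exact absurd h (by simp)
        · rintro ⟨-, h2⟩; exact absurd hm (h2 a (by simp) ha)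
      · simp only [crGo, if_neg ha, hc, hm, decide_false, Bool.false_eq_true, if_false,
          ih]
        constructor
        · rintro ⟨hnd, hseen⟩
          have hmemadd : ∀ x, x ∈ PySem.Set.add seen a ↔ x ∈ seen ∨ x = a := by
            intro x; simp [PySem.Set.add, hm]
          have hfc : List.filter (fun x => decide (x ≠ 0)) (a :: rest)
              = a :: List.filter (fun x => decide (x ≠ 0)) rest := by
            simp [ha]
          refine ⟨?_, ?_⟩
          · rw [hfc, List.nodup_cons]
            refine ⟨?_, hnd⟩
            intro hmem
            have : a ∈ rest := (List.mem_filter.mp hmem).1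
            exact (hseen a this ha) ((hmemadd a).mpr (Or.inr rfl))
          · intro x hx hx0
            rcases List.mem_cons.mp hx with rfl | hx'
            · exact hm
            · intro hxs
              exact (hseen x hx' hx0) ((hmemadd x).mpr (Or.inl hxs))
        · rintro ⟨hnd, hseen⟩
          have hmemadd : ∀ x, x ∈ PySem.Set.add seen a ↔ x ∈ seen ∨ x = a := by
            intro x; simp [PySem.Set.add, hm]
          have hfc : List.filter (fun x => decide (x ≠ 0)) (a :: rest)
              = a :: List.filter (fun x => decide (x ≠ 0)) rest := by
            simp [ha]
          rw [hfc, List.nodup_cons] at hnd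
          refine ⟨hnd.2, ?_⟩
          intro x hx hx0 hxadd
          rcases (hmemadd x).mp hxadd with hxs | hxa
          · exact (hseen x (by simp [hx]) hx0) hxs
          · subst hxa
            exact hnd.1 (List.mem_filter.mpr ⟨hx, by simp [hx0]⟩)

-- B as an explicit predicate on the input
theorem crB_char (array : List Int) :
    check_repetition_alt array = true ↔ ∀ k ∈ array, k ≠ 0 → array.count k ≤ 1 := by
  unfold check_repetition_alt
  rw [crGo_char]
  have hempty : ∀ x ∈ array, x ≠ 0 → x ∉ (PySem.Set.empty : PySem.Set Int) := by
    intro x _ _ hx; simp [PySem.Set.empty] at hx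
  constructor
  · rintro ⟨hnd, -⟩ k hk hk0
    have := List.nodup_iff_count_le_one.mp hnd k
    rwa [List.count_filter (by simp [hk0])] at this
  · intro h
    refine ⟨List.nodup_iff_count_le_one.mpr ?_, hempty⟩
    intro a
    by_cases ha : a = 0
    · have hnm : a ∉ List.filter (fun x => decide (x ≠ 0)) array := by
        intro hmem; simpa [ha] using (List.mem_filter.mp hmem).2
      rw [List.count_eq_zero_of_not_mem hnm]; omega
    · rw [List.count_filter (by simp [ha])]
      by_cases hm : a ∈ array
      · exact h a hm ha
      · simp [List.count_eq_zero_of_not_mem hm]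

-- ===== VERDICT (by name: the statement is the Claim_ definition above) =====
theorem check_repetition_spec : Claim_equal_check_repetition := by
  intro array _
  unfold Spec_check_repetition
  have hA := crA_char array
  have hB := crB_char array
  cases hBv : check_repetition_alt array with
  | true => exact hA.mpr (hB.mp hBv)
  | false =>
    cases hAv : check_repetition array with
    | false => rfl
    | true =>
      exact absurd (hB.mpr (hA.mp hAv)) (by simp [hBv])
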